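-- pv_equiv track=rewrite | github.com/exo7math/python1-exo7 | listes/listes_II_idees.py | addition_bloc_carre
-- ===== SOURCE A (Python) =====
-- def addition_bloc_carre(grand_carre,petit_carre):
--
--     N = len(grand_carre)
--     n = len(petit_carre)
--     # k = N//n
--
--     nouv_carre = [[0 for j in range(N)] for i in range(N)]
--
--     for i in range(N):
--         for j in range(N):
--             nouv_carre[i][j] = grand_carre[i][j] + petit_carre[i%n][j%n]
--
--     return nouv_carre
-- ===== SOURCE B (Python) =====
-- def addition_bloc_carre(grand_carre, petit_carre):
--     N = len(grand_carre)
--     n = len(petit_carre)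
--     if N == 0:
--         return []
--     reps = N // n + 1
--     # stage 1: build the fully tiled N x N small square by list repetition + truncation
--     tile = [(row[:n] * reps)[:N] for row in petit_carre]
--     tiled = (tile * reps)[:N]
--     # stage 2: element-wise addition
--     return [[g + p for g, p in zip(grow, prow)] for grow, prow in zip(grand_carre, tiled)]
-- ===== Notes on version B (the rewrite author's own statement) =====
-- stated objective: alternative
-- what changed: Replaces the single modular-indexed nested loop writing into a preallocated zero matrix by a two-stage pipeline: first build the tiled N x N small square via list repetition and truncation, then add it to grand_carre element-wise with zip comprehensions.
import Mathlib
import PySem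

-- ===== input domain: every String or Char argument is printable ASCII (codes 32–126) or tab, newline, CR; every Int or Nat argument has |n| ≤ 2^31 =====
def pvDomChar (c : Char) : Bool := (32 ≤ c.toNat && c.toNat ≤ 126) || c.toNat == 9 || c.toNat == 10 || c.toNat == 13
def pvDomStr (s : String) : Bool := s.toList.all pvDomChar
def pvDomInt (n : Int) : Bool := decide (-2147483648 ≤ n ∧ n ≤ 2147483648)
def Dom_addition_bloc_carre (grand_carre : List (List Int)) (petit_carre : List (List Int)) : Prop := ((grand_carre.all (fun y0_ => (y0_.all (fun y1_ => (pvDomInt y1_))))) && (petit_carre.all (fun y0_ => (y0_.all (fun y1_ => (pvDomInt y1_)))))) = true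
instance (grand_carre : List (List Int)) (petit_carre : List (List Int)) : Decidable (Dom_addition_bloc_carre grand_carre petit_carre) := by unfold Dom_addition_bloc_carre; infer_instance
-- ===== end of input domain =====

-- B replaces A's modular-indexed nested loop (writing into a preallocated zero matrix) by a
-- two-stage pipeline: build the tiled N×N small square by list repetition and truncation, then
-- add it to grand_carre element-wise; same asymptotic cost, different decomposition.

-- ===== PORT A =====
def addition_bloc_carre (grand_carre : List (List Int)) (petit_carre : List (List Int)) : List (List Int) :=
  let N : Int := PySem.List.len grand_carre
  let n : Int := PySem.List.len petit_carre
  let nouv : List (List Int) :=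
    (PySem.List.pyRange 0 N 1).map (fun _ => (PySem.List.pyRange 0 N 1).map (fun _ => (0 : Int)))
  (PySem.List.pyRange 0 N 1).foldl (fun nouv i =>
    (PySem.List.pyRange 0 N 1).foldl (fun nouv j =>
      PySem.List.pySetD nouv i
        (PySem.List.pySetD (PySem.List.pyGetD nouv i [])  j
          (PySem.List.pyGetD (PySem.List.pyGetD grand_carre i []) j 0 +
           PySem.List.pyGetD (PySem.List.pyGetD petit_carre (PySem.Int.mod i n) [])
             (PySem.Int.mod j n) 0))) nouv) nouv

-- ===== PORT B =====
def addition_bloc_carre_alt (grand_carre : List (List Int)) (petit_carre : List (List Int)) : List (List Int) :=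
  let N : Nat := grand_carre.length
  let n : Nat := petit_carre.length
  if N = 0 then []
  else
    let reps : Nat := N / n + 1
    let tile : List (List Int) :=
      petit_carre.map (fun row => ((List.replicate reps (row.take n)).flatten).take N)
    let tiled : List (List Int) := ((List.replicate reps tile).flatten).take N
    (grand_carre.zip tiled).map (fun gp => (gp.1.zip gp.2).map (fun xy => xy.1 + xy.2))

-- ===== PRECONDITION & SPEC =====
-- Pre_ excludes exactly the inputs on which the Python A raises: a nonempty grand_carre with an
-- empty petit_carre (ZeroDivisionError from i % 0), a row of grand_carre shorter than N, or an
-- accessed row of petit_carre shorter than min(n, N) (IndexError).  A returns on everything else.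
def Pre_addition_bloc_carre (grand_carre : List (List Int)) (petit_carre : List (List Int)) : Prop :=
  grand_carre = [] ∨
    (petit_carre ≠ [] ∧
     (∀ r ∈ grand_carre, grand_carre.length ≤ r.length) ∧
     (∀ r ∈ petit_carre.take grand_carre.length,
        min petit_carre.length grand_carre.length ≤ r.length))
instance (grand_carre : List (List Int)) (petit_carre : List (List Int)) : Decidable (Pre_addition_bloc_carre grand_carre petit_carre) := by unfold Pre_addition_bloc_carre; infer_instance

def pvWitness_addition_bloc_carre : List (List Int) × List (List Int) := ([[1, 2], [3, 4]], [[10]])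

def Spec_addition_bloc_carre (grand_carre : List (List Int)) (petit_carre : List (List Int)) (out : List (List Int)) : Prop := out = addition_bloc_carre_alt grand_carre petit_carre
instance (grand_carre : List (List Int)) (petit_carre : List (List Int)) (out : List (List Int)) : Decidable (Spec_addition_bloc_carre grand_carre petit_carre out) := by unfold Spec_addition_bloc_carre; infer_instance

-- ===== CLAIM (what is proved, stated in full; the proofs are below) =====
def Claim_equal_addition_bloc_carre : Prop := ∀ (grand_carre : List (List Int)) (petit_carre : List (List Int)), Dom_addition_bloc_carre grand_carre petit_carre → Pre_addition_bloc_carre grand_carre petit_carre → Spec_addition_bloc_carre grand_carre petit_carre (addition_bloc_carre grand_carre petit_carre)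

-- ===== LEMMAS AND PROOFS =====

-- the value every cell (i, j) of the result carries
def pvVal (gc pc : List (List Int)) (i j : Nat) : Int :=
  (gc.getD i []).getD j 0 + (pc.getD (i % pc.length) []).getD (j % pc.length) 0

theorem pv_fill {α : Type} (N : Nat) (f : Nat → α) :
    ∀ (r : List α), N ≤ r.length →
      (List.range N).foldl (fun r j => r.set j (f j)) r = (List.range N).map f ++ r.drop N := by
  induction N with
  | zero => simp
  | succ N ih =>
    intro r h
    rw [List.range_succ, List.foldl_append, List.map_append, ih r (by omega)]
    simp only [List.foldl_cons, List.foldl_nil, List.map_cons, List.map_nil]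
    rw [List.set_append_right _ _ (by simp)]
    simp only [List.length_map, List.length_range, Nat.sub_self]
    rw [List.drop_eq_getElem_cons (show N < r.length by omega), List.set_cons_zero,
      List.append_assoc]
    rfl


theorem pv_inner (N i : Nat) (f : Nat → Int) :
    ∀ (m : List (List Int)), i < m.length →
      (List.range N).foldl (fun m j => m.set i ((m.getD i []).set j (f j))) m
        = m.set i ((List.range N).foldl (fun r j => r.set j (f j)) (m.getD i [])) := by
  induction N with
  | zero =>
    intro m h
    rw [List.range_zero, List.foldl_nil, List.foldl_nil, List.getD_eq_getElem?_getD,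
      List.getElem?_eq_getElem h]
    exact (List.set_getElem_self h).symm
  | succ N ih =>
    intro m h
    rw [List.range_succ, List.foldl_append, List.foldl_append, ih m h]
    simp only [List.foldl_cons, List.foldl_nil]
    have hg : (m.set i ((List.range N).foldl (fun r j => r.set j (f j)) (m.getD i []))).getD i []
        = (List.range N).foldl (fun r j => r.set j (f j)) (m.getD i []) := by
      rw [List.getD_eq_getElem?_getD, List.getElem?_set_self (by simpa using h)]
      rfl
    rw [hg, List.set_set]


theorem pv_flat_rep {α : Type} (k : Nat) (xs : List α) :
    ∀ (i : Nat), i < k * xs.length →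
      ((List.replicate k xs).flatten)[i]? = xs[i % xs.length]? := by
  induction k with
  | zero => intro i h; omega
  | succ k ih =>
    intro i h
    rw [List.replicate_succ, List.flatten_cons]
    by_cases hi : i < xs.length
    · rw [List.getElem?_append_left hi, Nat.mod_eq_of_lt hi]
    · have hlen : 0 < xs.length := by by_contra hl; simp at hl; simp [hl] at h
      obtain ⟨j, rfl⟩ : ∃ j, i = xs.length + j := ⟨i - xs.length, by omega⟩
      rw [List.getElem?_append_right (by omega)]
      simp only [Nat.add_sub_cancel_left]
      rw [ih j (by nlinarith), Nat.add_mod_left]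

theorem pv_outer (N : Nat) (v : Nat → Nat → Int) :
    ∀ (k : Nat) (m : List (List Int)), k ≤ m.length → (∀ r ∈ m, r.length = N) →
      (List.range k).foldl (fun m i =>
          (List.range N).foldl (fun m j => m.set i ((m.getD i []).set j (v i j))) m) m
        = (List.range k).map (fun i => (List.range N).map (v i)) ++ m.drop k := by
  intro k
  induction k with
  | zero => intro m _ _; simp
  | succ k ih =>
    intro m hk hrow
    rw [List.range_succ, List.foldl_append, List.map_append, ih m (by omega) hrow]
    simp only [List.foldl_cons, List.foldl_nil, List.map_cons, List.map_nil]
    have hklt : k < m.length := by omega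
    set pre := (List.range k).map (fun i => (List.range N).map (v i)) with hpre
    have hprelen : pre.length = k := by simp [hpre]
    have hgd : (pre ++ m.drop k).getD k [] = m[k] := by
      rw [List.getD_eq_getElem?_getD, List.getElem?_append_right (by omega),
        hprelen, Nat.sub_self, List.drop_eq_getElem_cons hklt]
      rfl
    rw [pv_inner N k (v k) (pre ++ m.drop k) (by simp [hprelen]; omega), hgd,
      pv_fill N (v k) m[k] (le_of_eq (hrow m[k] (List.getElem_mem hklt)).symm),
      List.drop_of_length_le (le_of_eq (hrow m[k] (List.getElem_mem hklt))),
      List.append_nil,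
      List.set_append_right _ _ (by omega), hprelen, Nat.sub_self,
      List.drop_eq_getElem_cons hklt, List.set_cons_zero, List.append_assoc]
    rfl

theorem pv_A_char (gc pc : List (List Int)) :
    addition_bloc_carre gc pc
      = (List.range gc.length).map (fun i => (List.range gc.length).map (pvVal gc pc i)) := by
  unfold addition_bloc_carre
  simp only [PySem.List.len_eq, PySem.List.pyRange_zero_nat, List.foldl_map, List.map_map,
    PySem.List.pySetD_natCast, PySem.List.pyGetD_natCast, PySem.Int.mod_natCast]
  rw [pv_outer gc.length
    (fun i j => (gc.getD i []).getD j 0 + (pc.getD (i % pc.length) []).getD (j % pc.length) 0)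
    gc.length _ (by simp) (by simp)]
  simp only [List.getD_eq_getElem?_getD]
  rw [List.drop_eq_nil_of_le (by simp)]
  rw [List.append_nil]
  refine List.map_congr_left (fun i hi => List.map_congr_left (fun j hj => ?_))
  unfold pvVal
  rw [List.getD_eq_getElem?_getD, List.getD_eq_getElem?_getD, List.getD_eq_getElem?_getD,
    List.getD_eq_getElem?_getD]

theorem pv_B_char (gc pc : List (List Int)) (hPre : Pre_addition_bloc_carre gc pc) :
    addition_bloc_carre_alt gc pc
      = (List.range gc.length).map (fun i => (List.range gc.length).map (pvVal gc pc i)) := by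
  by_cases hgc : gc = []
  · subst hgc; simp [addition_bloc_carre_alt]
  rcases hPre with h | ⟨hn, hg, hp⟩
  · exact absurd h hgc
  have hN : 0 < gc.length := List.length_pos_iff.mpr hgc
  have hn0 : 0 < pc.length := List.length_pos_iff.mpr hn
  have hrep : gc.length < (gc.length / pc.length + 1) * pc.length := by
    nlinarith [Nat.div_add_mod gc.length pc.length, Nat.mod_lt gc.length hn0]
  unfold addition_bloc_carre_alt
  simp only [if_neg (by omega : ¬ gc.length = 0)]
  apply List.ext_getElem?
  intro i
  rw [List.getElem?_map, List.getElem?_map]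
  set reps := gc.length / pc.length + 1 with hreps
  set tilefun : List Int → List Int :=
    (fun row => ((List.replicate reps (row.take pc.length)).flatten).take gc.length) with htf
  set tile := pc.map tilefun with htile
  set tiled := ((List.replicate reps tile).flatten).take gc.length with htiled
  have htilelen : tile.length = pc.length := by simp [htile]
  have hflatlen : (List.replicate reps tile).flatten.length = reps * pc.length := by
    simp [List.length_flatten, List.map_replicate, htilelen, List.sum_replicate, smul_eq_mul]
  have htiledlen : tiled.length = gc.length := by
    rw [htiled, List.length_take, hflatlen]; omega
  by_cases hi : i < gc.length
  · -- index in range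
    have himod : i % pc.length < pc.length := Nat.mod_lt i hn0
    have hrowq : tiled[i]? = some (tilefun pc[i % pc.length]) := by
      rw [htiled, List.getElem?_take, if_pos hi,
        pv_flat_rep reps tile i (by rw [htilelen]; omega), htilelen, htile,
        List.getElem?_map, List.getElem?_eq_getElem himod]
      rfl
    have hit : i < tiled.length := by omega
    have hzip : (gc.zip tiled)[i]? = some (gc[i], tilefun pc[i % pc.length]) := by
      rw [List.getElem?_eq_getElem (by simp [List.length_zip, htiledlen]; omega)]
      have h3 : tiled[i] = tilefun pc[i % pc.length] := by
        have h4 := hrowq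
        rw [List.getElem?_eq_getElem hit] at h4
        exact Option.some.inj h4
      simp [List.getElem_zip, h3]
    rw [hzip, List.getElem?_range hi, Option.map_some, Option.map_some]
    refine congrArg some ?_
    set row := pc[i % pc.length] with hrow
    have hmem : row ∈ pc.take gc.length := by
      have hlt : i % pc.length < (pc.take gc.length).length := by
        have : i % pc.length ≤ i := Nat.mod_le i pc.length
        simp [List.length_take]; omega
      have h5 : (pc.take gc.length)[i % pc.length] = row := by
        rw [hrow, List.getElem_take]
      exact h5 ▸ List.getElem_mem hlt
    have hrl : min pc.length gc.length ≤ row.length := hp row hmem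
    have hglen : gc.length ≤ gc[i].length := hg gc[i] (List.getElem_mem hi)
    have htlmin : (row.take pc.length).length = min pc.length row.length := by
      simp [List.length_take]
    have htlfacts : gc.length ≤ reps * (row.take pc.length).length ∧
        ∀ j < gc.length, j % (row.take pc.length).length = j % pc.length ∧
          j % pc.length < row.length := by
      rcases Nat.lt_or_ge row.length pc.length with hro | hro
      · have hNle : gc.length ≤ row.length := by
          rw [Nat.min_def] at hrl; split_ifs at hrl <;> omega
        have htlr : (row.take pc.length).length = row.length := by
          rw [Nat.min_def] at htlmin; split_ifs at htlmin <;> omega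
        have h1 : (row.take pc.length).length ≤ reps * (row.take pc.length).length :=
          Nat.le_mul_of_pos_left (n := reps) ((row.take pc.length).length)
            (show 0 < reps from hreps ▸ Nat.succ_pos _)
        refine ⟨by omega, fun j hj => ?_⟩
        rw [htlr, Nat.mod_eq_of_lt (by omega), Nat.mod_eq_of_lt (by omega)]
        omega
      · have htln : (row.take pc.length).length = pc.length := by
          rw [Nat.min_def] at htlmin; split_ifs at htlmin <;> omega
        refine ⟨by rw [htln]; omega, fun j hj => ?_⟩
        have := Nat.mod_lt j hn0
        rw [htln]
        omega
      -- note: in second branch j % pc.length = j since j < gc.length ≤ row.length < pc.length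
    have htflen : (tilefun row).length = gc.length := by
      have hfl : (List.replicate reps (row.take pc.length)).flatten.length
          = reps * (row.take pc.length).length := by
        simp [List.length_flatten, List.map_replicate, List.sum_replicate, smul_eq_mul]
      simp only [htf]
      rw [List.length_take, hfl]
      omega
    apply List.ext_getElem?
    intro j
    rw [List.getElem?_map, List.getElem?_map]
    by_cases hj : j < gc.length
    · obtain ⟨hmod_eq, hjn⟩ := htlfacts.2 j hj
      have htfj : (tilefun row)[j]? = some row[j % pc.length] := by
        simp only [htf]
        rw [List.getElem?_take, if_pos hj,
          pv_flat_rep reps (row.take pc.length) j (by omega),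
          List.getElem?_take, hmod_eq, if_pos (Nat.mod_lt j hn0),
          List.getElem?_eq_getElem hjn]
      have hjt : j < (tilefun row).length := by omega
      have hzip2 : (gc[i].zip (tilefun row))[j]? = some (gc[i][j], (tilefun row)[j]) := by
        rw [List.getElem?_eq_getElem (by simp [List.length_zip, htflen]; omega)]
        simp [List.getElem_zip]
      have h6 : (tilefun row)[j] = row[j % pc.length] := by
        have h7 := htfj
        rw [List.getElem?_eq_getElem hjt] at h7
        exact Option.some.inj h7
      rw [hzip2, List.getElem?_range hj, Option.map_some, Option.map_some, h6]
      refine congrArg some ?_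
      show gc[i][j] + row[j % pc.length] = pvVal gc pc i j
      unfold pvVal
      have e1 : gc.getD i [] = gc[i] := by
        rw [List.getD_eq_getElem?_getD, List.getElem?_eq_getElem hi, Option.getD_some]
      have e2 : pc.getD (i % pc.length) [] = row := by
        rw [List.getD_eq_getElem?_getD, List.getElem?_eq_getElem himod, Option.getD_some, hrow]
      have e3 : gc[i].getD j 0 = gc[i][j] := by
        rw [List.getD_eq_getElem?_getD,
          List.getElem?_eq_getElem (by omega : j < gc[i].length), Option.getD_some]
      have e4 : row.getD (j % pc.length) 0 = row[j % pc.length] := by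
        rw [List.getD_eq_getElem?_getD, List.getElem?_eq_getElem hjn, Option.getD_some]
      rw [e1, e2, e3, e4]
    · rw [List.getElem?_eq_none (by simp [List.length_zip, htflen]; omega),
        List.getElem?_eq_none (by simp; omega)]
      rfl
  · rw [List.getElem?_eq_none (by simp [List.length_zip, htiledlen]; omega),
      List.getElem?_eq_none (by simp; omega)]
    rfl

-- ===== VERDICT (by name: the statement is the Claim_ definition above) =====
theorem addition_bloc_carre_spec : Claim_equal_addition_bloc_carre := by
  intro gc pc _ hPre
  unfold Spec_addition_bloc_carre
  rw [pv_A_char gc pc, pv_B_char gc pc hPre]
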